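-- pv_equiv track=rewrite | github.com/KernAlex/Multiplex-Genotyping | genotype.py | validMutationList
-- ===== SOURCE A (Python) =====
-- def validMutationList(mutated_lists):
--     """
--     :param mutated_lists: A list of lists, containg assumed valid mutation
--     :return: True if a valid mutation
--         The nature of this is each set is a bipartate graph from id to the set it contains, and
--     from the set to the ids it contains.
--         If a set of ids has n unique ids, in n or more unique sets, then it is the case
--     that each id can be uniquely identified as mutated, else we can not make the assumption
--     all the ids are mutated, and it must return false.
--     Since this uses depth first search, let V be the number of sets plus the number of unique ids.
--     The edges are at most (V/2)^2 for a bitpartate graph, but that is usually unlikely, thus the runtime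
--     is O(V + E)
--     .
--     .
--     .
--     >>> validMutationList([[1, 2], [1, 3]])
--     False
--     >>> validMutationList([[1, 2], [1, 2]])
--     True
--     >>> validMutationList([[0,1], [1, 2], [2, 1], [3, 4, 5], [3, 4, 5]])
--     False
--     >>> validMutationList([[0,1], [1, 2], [2, 1], [3, 4, 5], [3, 4, 5], [3, 4, 5]])
--     True
--     """
--     ids_to_sets = {}
--     visited_nodes = {}
--
--     # This for loop creates the graph to perform the search. it chunks out the lists in the outer
--     # loop, than works on thos chunks in the inner loop, thus it is O(n) runtime
--     for i in range(len(mutated_lists)):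
--         temp_set = mutated_lists[i]
--         ids_to_sets[i*-1 - 1] = set()
--         for id in temp_set:
--             if id not in ids_to_sets:
--                 ids_to_sets[id] = {i*-1 - 1}
--                 ids_to_sets[i*-1 - 1].add(id)
--                 visited_nodes[i*-1 - 1] = False
--                 visited_nodes[id] = False
--             else:
--                 ids_to_sets[id].add(i* -1 - 1)
--                 ids_to_sets[i*-1 - 1].add(id)
--                 visited_nodes[i*-1 - 1] = False
--                 visited_nodes[id] = False
--     for unique_id in visited_nodes:
--         if visited_nodes[unique_id]:
--             continue
--         if not depthFirstSearch(unique_id, ids_to_sets, visited_nodes):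
--             return False
--     return True
--
-- def depthFirstSearch(current_id, ids_to_sets, visited_nodes):
--     """
--     Written from scratch, as this was a bit of a unique situation
--     Basically crawls throu ids to sets, if the current id is negative, it is a
--     set to a id, if postiive the other. Basic recursive definition.
--     O(V + E) time
--     :param current_id: current id we are to iterate on
--     :param ids_to_sets:
--     :param visited_nodes:
--     :return: True if # of sets >= # unique ids in particular bipartate graph, else false
--     .
--     .
--     .
--     >>> # case where same ids and sets
--     >>> ids_to_sets = {1:{-1, -2}, -1: {1, 2}, 2: {-1, -3}, -2: {1 ,3}, 3: {-2, -3}, -3: {3, 2}}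
--     >>> visited_nodes = {1: False, -1: False, 2: False, -2: False, 3: False, -3: False }
--     >>> depthFirstSearch(1, ids_to_sets, visited_nodes)
--     True
--     >>> # case where more ids than sets
--     >>> ids_to_sets = {1:{-1, -2}, -1: {1, 2}, 2: {-1}, -2: {1 ,3}, 3: {-2}, }
--     >>> visited_nodes = {1: False, -1: False, 2: False, -2: False, 3: False, -3: False }
--     >>> depthFirstSearch(1, ids_to_sets, visited_nodes)
--     False
--     >>> # case where less ids than sets
--     >>> ids_to_sets = {1:{-1, -2, -4}, -1: {1, 2}, 2: {-1, -3}, -2: {1 ,3}, 3: {-2, -3}, -3: {3, 2}, -4:{1, 2, 3}}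
--     >>> visited_nodes = {1: False, -1: False, 2: False, -2: False, 3: False, -3: False , -4: False}
--     >>> depthFirstSearch(1, ids_to_sets, visited_nodes)
--     True
--     """
--
--     # Keeps track of number of unique sets visited and number of uniqe ids visited.
--     def depthHelper(current_id, ids_to_sets, visited_nodes, count):
--         if visited_nodes[current_id]:
--             return
--         if current_id < 0:
--             count[0] += 1
--         else:
--             count[1] += 1
--         visited_nodes[current_id] = True
--         for unique_id in ids_to_sets[current_id]:
--             depthHelper(unique_id, ids_to_sets, visited_nodes, count)
--     count = [0, 0]
--     depthHelper(current_id, ids_to_sets,  visited_nodes, count)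
--
--     # if there are more sets (or equal) than unique items in the bipartate graph,
--     # than each id must be a mutated id
--     return count[0] >= count[1]
-- ===== SOURCE B (Python) =====
-- def validMutationList(mutated_lists):
--     # Different algorithm: instead of building a bipartite adjacency dict and
--     # running recursive DFS, maintain the connected components directly as a
--     # list of disjoint node-sets and merge every star {-i-1} | ids into them.
--     components = []
--     for i, ids in enumerate(mutated_lists):
--         if not ids:
--             continue  # an empty sublist contributes no edge, hence no node
--         star = set(ids)
--         star.add(-i - 1)
--         merged = star
--         rest = []
--         for comp in components:
--             if comp & star:
--                 merged = merged | comp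
--             else:
--                 rest.append(comp)
--         rest.append(merged)
--         components = rest
--     return all(sum(1 for x in c if x < 0) >= sum(1 for x in c if x >= 0)
--                for c in components)
-- ===== Notes on version B (the rewrite author's own statement) =====
-- stated objective: alternative
-- what changed: Replaces A's bipartite adjacency-dict construction plus recursive depth-first search per component by a single pass that maintains the connected components directly as a list of disjoint node sets, merging the star {-i-1} | ids of each non-empty sublist into the overlapping components and checking the set-node/id-node counts per final component.
-- outside the precondition, e.g. on validMutationList([[-4], [-4, 7, 8], [], [5]]): A returns False, B returns True
import Mathlib
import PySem

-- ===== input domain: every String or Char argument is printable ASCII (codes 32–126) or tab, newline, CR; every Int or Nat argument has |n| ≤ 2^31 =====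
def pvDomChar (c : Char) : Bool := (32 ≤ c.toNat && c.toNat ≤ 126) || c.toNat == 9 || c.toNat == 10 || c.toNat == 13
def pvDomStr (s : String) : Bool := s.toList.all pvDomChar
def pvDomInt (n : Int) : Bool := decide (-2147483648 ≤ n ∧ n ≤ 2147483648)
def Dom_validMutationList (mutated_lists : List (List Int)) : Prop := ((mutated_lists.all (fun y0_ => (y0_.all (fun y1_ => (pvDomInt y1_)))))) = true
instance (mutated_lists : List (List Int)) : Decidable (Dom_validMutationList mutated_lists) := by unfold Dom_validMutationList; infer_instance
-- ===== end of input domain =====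

-- B re-implements A's bipartite-graph + recursive-DFS check by maintaining the connected
-- components directly as a list of disjoint node sets and merging each star into them
-- (objective: alternative algorithm, similar cost; return value only — A mutates nothing).

-- ===== PORT A =====
-- ids_to_sets : Dict Int (Set Int); visited_nodes : Dict Int Bool.
-- Body of the inner 'for id in temp_set' loop of validMutationList.
def buildIdStep (i : Int) (st : PySem.Dict Int (PySem.Set Int) × PySem.Dict Int Bool) (id : Int) :
    PySem.Dict Int (PySem.Set Int) × PySem.Dict Int Bool :=
  if st.1.contains id = false then
    -- ids_to_sets[id] = {i*-1 - 1}; ids_to_sets[i*-1-1].add(id); visited updates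
    ((st.1.insert id (PySem.Set.add PySem.Set.empty (i * -1 - 1))).modify (i * -1 - 1)
        PySem.Set.empty (fun s => PySem.Set.add s id),
     (st.2.insert (i * -1 - 1) false).insert id false)
  else
    -- ids_to_sets[id].add(i*-1-1); ids_to_sets[i*-1-1].add(id); visited updates
    (((st.1.modify id PySem.Set.empty (fun s => PySem.Set.add s (i * -1 - 1))).modify (i * -1 - 1)
        PySem.Set.empty (fun s => PySem.Set.add s id)),
     (st.2.insert (i * -1 - 1) false).insert id false)

-- Body of the outer 'for i in range(len(mutated_lists))' loop.
def buildStep (ls : List (List Int)) (st : PySem.Dict Int (PySem.Set Int) × PySem.Dict Int Bool)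
    (i : Int) : PySem.Dict Int (PySem.Set Int) × PySem.Dict Int Bool :=
  let temp := PySem.List.pyGetD ls i []
  temp.foldl (buildIdStep i) (st.1.insert (i * -1 - 1) PySem.Set.empty, st.2)

-- Termination measure for the DFS: number of unvisited entries of visited_nodes.
def unvisitedCount (vis : PySem.Dict Int Bool) : Nat :=
  (vis.items.filter (fun kv => !kv.2)).length

lemma countFalse_map_le (l : List (Int × Bool)) (cur : Int) :
    ((l.map (fun p => if p.1 = cur then (cur, true) else p)).filter (fun kv => !kv.2)).length
      ≤ (l.filter (fun kv => !kv.2)).length := by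
  induction l with
  | nil => simp
  | cons hd tl ih =>
    obtain ⟨k, v⟩ := hd
    by_cases hk : k = cur <;> cases v <;> simp [hk] <;> omega

lemma countFalse_map_lt (l : List (Int × Bool)) (cur : Int)
    (h : (PySem.Dict.mk l).get? cur = some false) :
    ((l.map (fun p => if p.1 = cur then (cur, true) else p)).filter (fun kv => !kv.2)).length
      < (l.filter (fun kv => !kv.2)).length := by
  induction l with
  | nil => simp [PySem.Dict.get?] at h
  | cons hd tl ih =>
    obtain ⟨k, v⟩ := hd
    rw [PySem.Dict.get?_mk_cons] at h
    by_cases hk : k = cur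
    · simp only [hk, beq_self_eq_true, if_true, Option.some.injEq] at h
      have := countFalse_map_le tl cur
      simp [hk, h]
      omega
    · simp only [beq_iff_eq, hk, if_false] at h
      have := ih h
      cases v <;> simp [hk] <;> omega

lemma unvisited_insert_lt (vis : PySem.Dict Int Bool) (cur : Int)
    (h : vis.get? cur = some false) :
    unvisitedCount (vis.insert cur true) < unvisitedCount vis := by
  have hc : vis.contains cur = true := by
    rw [PySem.Dict.contains_eq_isSome_get?, h]; rfl
  unfold unvisitedCount
  rw [PySem.Dict.items_insert, if_pos hc]
  have := countFalse_map_lt vis.items cur (by cases vis; exact h)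
  simpa [beq_iff_eq] using this

-- depthHelper of A, with the recursion over the neighbour set realised through an explicit
-- pending list: the same nodes are visited in the same order and the same visited flags and
-- counters are produced (the recursive call on each neighbour in turn IS processing the
-- pending list neighbours-first); this shape gives the well-founded termination measure.
-- Python raises KeyError if current_id is no key of visited_nodes; that state is unreachable
-- from validMutationList (every pushed node is a key), the port skips such a node.
def dfsGo (adj : PySem.Dict Int (PySem.Set Int)) (stack : List Int)
    (vis : PySem.Dict Int Bool) (count : Int × Int) : PySem.Dict Int Bool × (Int × Int) :=
  match stack with
  | [] => (vis, count)
  | cur :: rest =>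
    match h : vis.get? cur with
    | some false =>
        dfsGo adj ((adj.getD cur PySem.Set.empty) ++ rest) (vis.insert cur true)
          (if cur < 0 then (count.1 + 1, count.2) else (count.1, count.2 + 1))
    | _ => dfsGo adj rest vis count
termination_by (unvisitedCount vis, stack.length)
decreasing_by
  · exact Prod.Lex.left _ _ (unvisited_insert_lt vis cur h)
  · exact Prod.Lex.right _ (Nat.lt_succ_self _)

def depthFirstSearch (current : Int) (adj : PySem.Dict Int (PySem.Set Int))
    (vis : PySem.Dict Int Bool) : PySem.Dict Int Bool × Bool :=
  let r := dfsGo adj [current] vis (0, 0)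
  (r.1, decide (r.2.1 ≥ r.2.2))

-- 'for unique_id in visited_nodes: …' (keys snapshot; values only are mutated during it)
def checkLoop (adj : PySem.Dict Int (PySem.Set Int)) (vis : PySem.Dict Int Bool)
    (ks : List Int) : Bool :=
  match ks with
  | [] => true
  | k :: rest =>
    if vis.getD k false then checkLoop adj vis rest
    else
      let r := depthFirstSearch k adj vis
      if r.2 then checkLoop adj r.1 rest else false

def validMutationList (mutated_lists : List (List Int)) : Bool :=
  let st := (PySem.List.pyRange 0 (PySem.List.len mutated_lists) 1).foldl
      (buildStep mutated_lists) (PySem.Dict.empty, PySem.Dict.empty)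
  checkLoop st.1 st.2 st.2.keys

-- ===== PORT B =====
def altMergeStep (comps : List (PySem.Set Int)) (p : Int × List Int) : List (PySem.Set Int) :=
  if p.2.isEmpty then comps
  else
    let star := PySem.Set.add (PySem.Set.ofList p.2) (-p.1 - 1)
    let mr := comps.foldl
      (fun (mr : PySem.Set Int × List (PySem.Set Int)) comp =>
        if PySem.Set.inter comp star ≠ [] then (PySem.Set.union mr.1 comp, mr.2)
        else (mr.1, mr.2 ++ [comp]))
      (star, [])
    mr.2 ++ [mr.1]

def validMutationList_alt (mutated_lists : List (List Int)) : Bool :=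
  let comps := (PySem.List.enumerate mutated_lists 0).foldl altMergeStep []
  comps.all (fun c =>
    decide (c.countP (fun x => decide (x < 0)) ≥ c.countP (fun x => decide (0 ≤ x))))

-- ===== PRECONDITION & SPEC =====
-- Pre_ excludes inputs where an id value collides with the key -(i+1) that A uses internally
-- for the set-node of a LATER sublist i: there A's unconditional 'ids_to_sets[i*-1-1] = set()'
-- re-initialisation drops the edges recorded for that id, the id/set-node namespaces overlap
-- and the intended bipartite graph is ill-defined, so A's and B's answers are both accidental
-- (B reports the undirected components).  Ids occurring in their own or earlier sublists, and
-- all non-negative ids, are inside Pre_.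
def Pre_validMutationList (mutated_lists : List (List Int)) : Prop :=
  ∀ i < mutated_lists.length, ∀ j < i, (-(i : Int) - 1) ∉ mutated_lists.getD j []
instance (mutated_lists : List (List Int)) : Decidable (Pre_validMutationList mutated_lists) := by
  unfold Pre_validMutationList; infer_instance
def pvWitness_validMutationList : List (List Int) := [[0, 1], [1, 2], [2, 1], [3, 4, 5], [3, 4, 5]]
def Spec_validMutationList (mutated_lists : List (List Int)) (out : Bool) : Prop :=
  out = validMutationList_alt mutated_lists
instance (mutated_lists : List (List Int)) (out : Bool) :
    Decidable (Spec_validMutationList mutated_lists out) := by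
  unfold Spec_validMutationList; infer_instance

-- ===== CLAIM (what is proved, stated in full; the proofs are below) =====
def Claim_equal_validMutationList : Prop := ∀ (mutated_lists : List (List Int)), Dom_validMutationList mutated_lists → Pre_validMutationList mutated_lists → Spec_validMutationList mutated_lists (validMutationList mutated_lists)

-- ===== LEMMAS AND PROOFS =====

-- The shared abstract graph: pairs ps = enumerate(mutated_lists), hub of p is p.1 * -1 - 1.
def pvRel (ps : List (Int × List Int)) (x y : Int) : Prop :=
  ∃ p ∈ ps, (x = p.1 * -1 - 1 ∧ y ∈ p.2) ∨ (y = p.1 * -1 - 1 ∧ x ∈ p.2)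

def pvConn (ps : List (Int × List Int)) (x y : Int) : Prop :=
  Relation.ReflTransGen (pvRel ps) x y

def nodeList (ps : List (Int × List Int)) : List Int :=
  ps.flatMap (fun p => if p.2.isEmpty then [] else (p.1 * -1 - 1) :: p.2)

def pvNode (ps : List (Int × List Int)) (x : Int) : Prop := x ∈ nodeList ps

noncomputable def compF (ps : List (Int × List Int)) (v : Int) : Finset Int :=
  @Finset.filter _ (fun x => pvConn ps v x) (fun _ => Classical.propDecidable _)
    (nodeList ps).toFinset

def pvCond (ps : List (Int × List Int)) (v : Int) : Prop :=
  ((compF ps v).filter (fun x => x < 0)).card ≥ ((compF ps v).filter (fun x => 0 ≤ x)).card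

def pvGood (ps : List (Int × List Int)) : Prop := ∀ v, pvNode ps v → pvCond ps v

-- basic facts
lemma pvRel_symm (ps : List (Int × List Int)) (x y : Int) (h : pvRel ps x y) : pvRel ps y x := by
  obtain ⟨p, hp, h⟩ := h; exact ⟨p, hp, h.symm⟩

lemma pvConn_symm (ps : List (Int × List Int)) (x y : Int) (h : pvConn ps x y) : pvConn ps y x := by
  induction h with
  | refl => exact Relation.ReflTransGen.refl
  | tail _ hzy ih =>
      exact Relation.ReflTransGen.trans (Relation.ReflTransGen.single (pvRel_symm _ _ _ hzy)) ih

lemma mem_nodeList (ps : List (Int × List Int)) (x : Int) :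
    pvNode ps x ↔ ∃ p ∈ ps, p.2 ≠ [] ∧ (x = p.1 * -1 - 1 ∨ x ∈ p.2) := by
  unfold pvNode nodeList
  simp only [List.mem_flatMap]
  constructor
  · rintro ⟨p, hp, hx⟩
    by_cases he : p.2.isEmpty
    · rw [if_pos he] at hx
      exact absurd hx (List.not_mem_nil)
    · rw [if_neg he] at hx
      rw [List.mem_cons] at hx
      exact ⟨p, hp, fun hnil => he (by rw [hnil]; rfl), hx⟩
  · rintro ⟨p, hp, hne, hx⟩
    refine ⟨p, hp, ?_⟩
    rw [if_neg (by simpa [List.isEmpty_iff] using hne)]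
    exact List.mem_cons.2 hx

lemma pvRel_node (ps : List (Int × List Int)) (x y : Int) (h : pvRel ps x y) :
    pvNode ps x ∧ pvNode ps y := by
  obtain ⟨p, hp, h | h⟩ := h
  · have hne : p.2 ≠ [] := List.ne_nil_of_mem h.2
    exact ⟨(mem_nodeList ps x).2 ⟨p, hp, hne, Or.inl h.1⟩,
           (mem_nodeList ps y).2 ⟨p, hp, hne, Or.inr h.2⟩⟩
  · have hne : p.2 ≠ [] := List.ne_nil_of_mem h.2
    exact ⟨(mem_nodeList ps x).2 ⟨p, hp, hne, Or.inr h.2⟩,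
           (mem_nodeList ps y).2 ⟨p, hp, hne, Or.inl h.1⟩⟩

lemma pvConn_node (ps : List (Int × List Int)) (x y : Int) (h : pvConn ps x y) (hne : x ≠ y) :
    pvNode ps x ∧ pvNode ps y := by
  induction h with
  | refl => exact absurd rfl hne
  | @tail z w hxz hzw ih =>
    refine ⟨?_, (pvRel_node ps z w hzw).2⟩
    by_cases hxz' : x = z
    · subst hxz'; exact (pvRel_node ps x w hzw).1
    · exact (ih hxz').1

lemma rel_append (ps : List (Int × List Int)) (p : Int × List Int) (x y : Int) :
    pvRel (ps ++ [p]) x y ↔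
      pvRel ps x y ∨ (x = p.1 * -1 - 1 ∧ y ∈ p.2) ∨ (y = p.1 * -1 - 1 ∧ x ∈ p.2) := by
  unfold pvRel
  simp only [List.mem_append, List.mem_singleton]
  constructor
  · rintro ⟨q, hq | rfl, hcase⟩
    · exact Or.inl ⟨q, hq, hcase⟩
    · exact Or.inr hcase
  · rintro (⟨q, hq, hcase⟩ | hcase)
    · exact ⟨q, Or.inl hq, hcase⟩
    · exact ⟨p, Or.inr rfl, hcase⟩

lemma node_append (ps : List (Int × List Int)) (p : Int × List Int) (x : Int) :
    pvNode (ps ++ [p]) x ↔ pvNode ps x ∨ (p.2 ≠ [] ∧ (x = p.1 * -1 - 1 ∨ x ∈ p.2)) := by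
  rw [mem_nodeList, mem_nodeList]
  simp only [List.mem_append, List.mem_singleton]
  constructor
  · rintro ⟨q, hq | rfl, hcase⟩
    · exact Or.inl ⟨q, hq, hcase⟩
    · exact Or.inr hcase
  · rintro (⟨q, hq, hcase⟩ | hcase)
    · exact ⟨q, Or.inl hq, hcase⟩
    · exact ⟨p, Or.inr rfl, hcase⟩

lemma conn_mono (ps : List (Int × List Int)) (p : Int × List Int) (x y : Int)
    (h : pvConn ps x y) : pvConn (ps ++ [p]) x y := by
  refine Relation.ReflTransGen.mono ?_ h
  intro a b hab
  obtain ⟨q, hq, hc⟩ := hab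
  exact ⟨q, List.mem_append_left _ hq, hc⟩

-- connectivity after appending one star
lemma conn_hub (ps : List (Int × List Int)) (p : Int × List Int) (a : Int)
    (ha : a = p.1 * -1 - 1 ∨ a ∈ p.2) : pvConn (ps ++ [p]) a (p.1 * -1 - 1) := by
  rcases ha with rfl | ha
  · exact Relation.ReflTransGen.refl
  · exact Relation.ReflTransGen.single ⟨p, List.mem_append_right _ (List.mem_singleton_self p),
      Or.inr ⟨rfl, ha⟩⟩

lemma conn_append (ps : List (Int × List Int)) (p : Int × List Int) (x y : Int) :
    pvConn (ps ++ [p]) x y ↔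
      pvConn ps x y ∨
        ((∃ a, (a = p.1 * -1 - 1 ∨ a ∈ p.2) ∧ pvConn ps x a) ∧
         (∃ b, (b = p.1 * -1 - 1 ∨ b ∈ p.2) ∧ pvConn ps y b)) := by
  constructor
  · intro h
    induction h with
    | refl => exact Or.inl Relation.ReflTransGen.refl
    | @tail z w hxz hzw ih =>
      rcases (rel_append ps p z w).1 hzw with hrel | hstar
      · rcases ih with hconn | ⟨ha, b, hSb, hzb⟩
        · exact Or.inl (hconn.tail hrel)
        · exact Or.inr ⟨ha, b, hSb,
            Relation.ReflTransGen.trans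
              (Relation.ReflTransGen.single (pvRel_symm ps z w hrel)) hzb⟩
      · have hzS : z = p.1 * -1 - 1 ∨ z ∈ p.2 := by tauto
        have hwS : w = p.1 * -1 - 1 ∨ w ∈ p.2 := by tauto
        rcases ih with hconn | ⟨ha, -⟩
        · exact Or.inr ⟨⟨z, hzS, hconn⟩, ⟨w, hwS, Relation.ReflTransGen.refl⟩⟩
        · exact Or.inr ⟨ha, ⟨w, hwS, Relation.ReflTransGen.refl⟩⟩
  · rintro (hconn | ⟨⟨a, hSa, hxa⟩, b, hSb, hyb⟩)
    · exact conn_mono ps p x y hconn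
    · have h1 : pvConn (ps ++ [p]) x a := conn_mono ps p x a hxa
      have h2 : pvConn (ps ++ [p]) a (p.1 * -1 - 1) := conn_hub ps p a hSa
      have h3 : pvConn (ps ++ [p]) b (p.1 * -1 - 1) := conn_hub ps p b hSb
      have h4 : pvConn (ps ++ [p]) y b := conn_mono ps p y b hyb
      exact h1.trans (h2.trans (Relation.ReflTransGen.trans
        (pvConn_symm _ _ _ h3) (pvConn_symm _ _ _ h4)))

-- ===== avoid-set reachability (the DFS invariant language) =====
def RA (r : Int → Int → Prop) (T : Int → Prop) (s x : Int) : Prop :=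
  ¬ T s ∧ Relation.ReflTransGen (fun a b => r a b ∧ ¬ T a ∧ ¬ T b) s x

lemma RA_endpoint (r : Int → Int → Prop) (T : Int → Prop) (s x : Int) (h : RA r T s x) : ¬ T x := by
  obtain ⟨hs, hchain⟩ := h
  induction hchain with
  | refl => exact hs
  | tail _ hst _ => exact hst.2.2

lemma RA_mono (r : Int → Int → Prop) (T T' : Int → Prop) (s x : Int)
    (hsub : ∀ z, T z → T' z) (h : RA r T' s x) : RA r T s x := by
  obtain ⟨hs, hchain⟩ := h
  refine ⟨fun hTs => hs (hsub _ hTs), Relation.ReflTransGen.mono ?_ hchain⟩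
  rintro a b ⟨hr, ha, hb⟩
  exact ⟨hr, fun hTa => ha (hsub _ hTa), fun hTb => hb (hsub _ hTb)⟩

lemma RA_head (r : Int → Int → Prop) (T : Int → Prop) (cur y x : Int)
    (hc : ¬ T cur) (hr : r cur y) (h : RA r T y x) : RA r T cur x := by
  exact ⟨hc, Relation.ReflTransGen.head ⟨hr, hc, h.1⟩ h.2⟩

lemma RA_hub (r : Int → Int → Prop) (T : Int → Prop) (cur x : Int) (hc : ¬ T cur) :
    RA r T cur x ↔ (x = cur ∨ ∃ y, r cur y ∧ RA r (fun z => T z ∨ z = cur) y x) := by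
  constructor
  · rintro ⟨-, hchain⟩
    induction hchain with
    | refl => exact Or.inl rfl
    | @tail z w hcz hzw ih =>
      rcases ih with hzc | ⟨y, hry, hRA⟩
      · by_cases hw : w = cur
        · exact Or.inl hw
        · rw [hzc] at hzw
          exact Or.inr ⟨w, hzw.1, ⟨fun h => h.elim hzw.2.2 hw, Relation.ReflTransGen.refl⟩⟩
      · have hz' : ¬ (T z ∨ z = cur) := RA_endpoint _ _ _ _ ⟨hRA.1, hRA.2⟩
        by_cases hw : w = cur
        · exact Or.inl hw
        · exact Or.inr ⟨y, hry,
            ⟨hRA.1, hRA.2.tail ⟨hzw.1, hz', fun h => h.elim hzw.2.2 hw⟩⟩⟩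
  · rintro (rfl | ⟨y, hry, hRA⟩)
    · exact ⟨hc, Relation.ReflTransGen.refl⟩
    · have := RA_mono r T (fun z => T z ∨ z = cur) y x (fun z hz => Or.inl hz) hRA
      exact RA_head r T cur y x hc hry this

lemma RA_shift (r : Int → Int → Prop) (T : Int → Prop) (cur s x : Int)
    (hc : ¬ T cur) (h : RA r T s x) :
    RA r (fun z => T z ∨ z = cur) s x ∨ RA r T cur x := by
  obtain ⟨hs, hchain⟩ := h
  induction hchain with
  | refl =>
    by_cases hsc : s = cur
    · subst hsc; exact Or.inr ⟨hc, Relation.ReflTransGen.refl⟩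
    · exact Or.inl ⟨fun h => h.elim hs hsc, Relation.ReflTransGen.refl⟩
  | @tail z w hsz hzw ih =>
    rcases ih with hL | hR
    · have hz' : ¬ (T z ∨ z = cur) := RA_endpoint _ _ _ _ ⟨hL.1, hL.2⟩
      by_cases hw : w = cur
      · subst hw; exact Or.inr ⟨hc, Relation.ReflTransGen.refl⟩
      · exact Or.inl ⟨hL.1, hL.2.tail ⟨hzw.1, hz', fun h => h.elim hzw.2.2 hw⟩⟩
    · exact Or.inr ⟨hR.1, hR.2.tail hzw⟩

lemma RA_closed (r : Int → Int → Prop) (T : Int → Prop) (k x : Int)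
    (hsym : ∀ a b, r a b → r b a)
    (hcl : ∀ a b, T a → r a b → T b) (hk : ¬ T k) :
    RA r T k x ↔ Relation.ReflTransGen r k x := by
  constructor
  · rintro ⟨-, hchain⟩
    exact Relation.ReflTransGen.mono (fun a b h => h.1) hchain
  · intro hchain
    refine ⟨hk, ?_⟩
    induction hchain with
    | refl => exact Relation.ReflTransGen.refl
    | @tail z w hkz hzw ih =>
      have hz : ¬ T z := by
        rcases Relation.ReflTransGen.cases_tail ih with h | ⟨c, _, hstep⟩
        · rw [h]; exact hk
        · exact hstep.2.2
      have hw : ¬ T w := fun hTw => hz (hcl w z hTw (hsym z w hzw))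
      exact ih.tail ⟨hzw, hz, hw⟩

-- ===== side A: the DFS and the outer loop =====
def Tof (vis : PySem.Dict Int Bool) (x : Int) : Prop := vis.get? x = some true

def negTrue (vis : PySem.Dict Int Bool) : Nat :=
  ((vis.keys.toFinset).filter (fun x => vis.get? x = some true ∧ x < 0)).card

def posTrue (vis : PySem.Dict Int Bool) : Nat :=
  ((vis.keys.toFinset).filter (fun x => vis.get? x = some true ∧ 0 ≤ x)).card

lemma keys_insert_contained (vis : PySem.Dict Int Bool) (cur : Int) (v : Bool)
    (hc : vis.contains cur = true) : (vis.insert cur v).keys = vis.keys := by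
  simp only [PySem.Dict.keys, PySem.Dict.items_insert, hc, if_true, List.map_map]
  refine List.map_congr_left ?_
  intro p _
  by_cases hp : p.1 = cur <;> simp [hp]

lemma trueCard_insert (vis : PySem.Dict Int Bool) (cur : Int) (pb : Int → Prop)
    [DecidablePred pb] (h : vis.get? cur = some false) :
    (((vis.insert cur true).keys.toFinset).filter
        (fun x => (vis.insert cur true).get? x = some true ∧ pb x)).card
      = ((vis.keys.toFinset).filter (fun x => vis.get? x = some true ∧ pb x)).card
        + (if pb cur then 1 else 0) := by
  have hc : vis.contains cur = true := by
    rw [PySem.Dict.contains_eq_isSome_get?, h]; rfl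
  have hkeys := keys_insert_contained vis cur true hc
  have hmem : cur ∈ vis.keys.toFinset := by
    rw [List.mem_toFinset]
    exact (PySem.Dict.contains_iff_mem_keys vis cur).1 hc
  by_cases hp : pb cur
  · rw [if_pos hp]
    have : ((vis.insert cur true).keys.toFinset).filter
        (fun x => (vis.insert cur true).get? x = some true ∧ pb x)
        = insert cur ((vis.keys.toFinset).filter (fun x => vis.get? x = some true ∧ pb x)) := by
      ext x
      rw [Finset.mem_insert, Finset.mem_filter, Finset.mem_filter, hkeys,
        PySem.Dict.get?_insert]
      by_cases hx : x = cur
      · subst hx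
        simp [hp, hmem, h]
      · simp [hx]
    rw [this, Finset.card_insert_of_notMem]
    rw [Finset.mem_filter, h]
    rintro ⟨-, hfalse, -⟩
    exact Bool.false_ne_true (Option.some.inj hfalse)
  · rw [if_neg hp, Nat.add_zero]
    congr 1
    ext x
    rw [Finset.mem_filter, Finset.mem_filter, hkeys, PySem.Dict.get?_insert]
    by_cases hx : x = cur
    · subst hx; simp [hp]
    · simp [hx]

lemma negTrue_insert (vis : PySem.Dict Int Bool) (cur : Int)
    (h : vis.get? cur = some false) :
    (negTrue (vis.insert cur true) : Int) = negTrue vis + (if cur < 0 then 1 else 0) := by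
  unfold negTrue
  rw [trueCard_insert vis cur (fun x => x < 0) h]
  by_cases hc : cur < 0 <;> simp [hc]

lemma posTrue_insert (vis : PySem.Dict Int Bool) (cur : Int)
    (h : vis.get? cur = some false) :
    (posTrue (vis.insert cur true) : Int) = posTrue vis + (if cur < 0 then 0 else 1) := by
  unfold posTrue
  rw [trueCard_insert vis cur (fun x => 0 ≤ x) h]
  by_cases hc : cur < 0
  · have h0 : ¬ (0 ≤ cur) := by omega
    simp [hc, h0]
  · have h0 : 0 ≤ cur := by omega
    simp [hc, h0]

lemma RA_congr (r : Int → Int → Prop) (T T' : Int → Prop) (s x : Int)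
    (h : ∀ z, T z ↔ T' z) : (RA r T s x ↔ RA r T' s x) :=
  ⟨RA_mono r T' T s x (fun z hz => (h z).2 hz), RA_mono r T T' s x (fun z hz => (h z).1 hz)⟩

lemma Tof_insert (vis : PySem.Dict Int Bool) (cur x : Int) :
    Tof (vis.insert cur true) x ↔ (Tof vis x ∨ x = cur) := by
  unfold Tof
  rw [PySem.Dict.get?_insert]
  by_cases hx : x = cur <;> simp [hx]

lemma dfsGo_nil (adj : PySem.Dict Int (PySem.Set Int)) (vis : PySem.Dict Int Bool)
    (count : Int × Int) : dfsGo adj [] vis count = (vis, count) := by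
  rw [dfsGo]

lemma dfsGo_cons_mark (adj : PySem.Dict Int (PySem.Set Int)) (cur : Int) (rest : List Int)
    (vis : PySem.Dict Int Bool) (count : Int × Int) (h : vis.get? cur = some false) :
    dfsGo adj (cur :: rest) vis count
      = dfsGo adj ((adj.getD cur PySem.Set.empty) ++ rest) (vis.insert cur true)
          (if cur < 0 then (count.1 + 1, count.2) else (count.1, count.2 + 1)) := by
  rw [dfsGo]
  split
  · rfl
  · next hcontra => exact absurd h hcontra

lemma dfsGo_cons_skip (adj : PySem.Dict Int (PySem.Set Int)) (cur : Int) (rest : List Int)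
    (vis : PySem.Dict Int Bool) (count : Int × Int) (h : vis.get? cur ≠ some false) :
    dfsGo adj (cur :: rest) vis count = dfsGo adj rest vis count := by
  rw [dfsGo]
  split
  · next hv => exact absurd hv h
  · next _ => rfl

lemma dfsGo_spec (E : List (Int × List Int)) (adj : PySem.Dict Int (PySem.Set Int))
    (H1 : ∀ x y, y ∈ adj.getD x PySem.Set.empty ↔ pvRel E x y) :
    ∀ (stack : List Int) (vis : PySem.Dict Int Bool) (count : Int × Int),
    (∀ x, vis.contains x = true ↔ pvNode E x) →
    vis.keys.Nodup →
    (∀ s ∈ stack, pvNode E s) →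
    (dfsGo adj stack vis count).1.keys = vis.keys ∧
    (∀ x, Tof (dfsGo adj stack vis count).1 x ↔
        (Tof vis x ∨ ∃ s ∈ stack, RA (pvRel E) (Tof vis) s x)) ∧
    (dfsGo adj stack vis count).2.1
      = count.1 + ((negTrue (dfsGo adj stack vis count).1 : Int) - negTrue vis) ∧
    (dfsGo adj stack vis count).2.2
      = count.2 + ((posTrue (dfsGo adj stack vis count).1 : Int) - posTrue vis) := by
  intro stack vis count
  induction stack, vis, count using dfsGo.induct adj with
  | case1 vis count =>
    intro _ _ _
    rw [dfsGo_nil]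
    refine ⟨rfl, fun x => by simp, by simp, by simp⟩
  | case2 vis count cur rest h ih =>
    intro hcont hnd hstack
    have hcurT : ¬ Tof vis cur := by
      unfold Tof; rw [h]; simp
    have hc : vis.contains cur = true := by
      rw [PySem.Dict.contains_eq_isSome_get?, h]; rfl
    have hkeys2 : (vis.insert cur true).keys = vis.keys := keys_insert_contained vis cur true hc
    have hcont2 : ∀ x, (vis.insert cur true).contains x = true ↔ pvNode E x := by
      intro x
      rw [PySem.Dict.contains_iff_mem_keys, hkeys2, ← PySem.Dict.contains_iff_mem_keys]
      exact hcont x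
    have hnd2 : (vis.insert cur true).keys.Nodup := by rwa [hkeys2]
    have hstack2 : ∀ s ∈ (adj.getD cur PySem.Set.empty) ++ rest, pvNode E s := by
      intro s hs
      rcases List.mem_append.1 hs with hs | hs
      · exact (pvRel_node E cur s ((H1 cur s).1 hs)).2
      · exact hstack s (List.mem_cons_of_mem _ hs)
    obtain ⟨ihk, ihT, ihc1, ihc2⟩ := ih hcont2 hnd2 hstack2
    simp only [dite_eq_ite] at ihk ihT ihc1 ihc2
    rw [dfsGo_cons_mark adj cur rest vis count h]
    have hTof2 : ∀ z, Tof (vis.insert cur true) z ↔ (Tof vis z ∨ z = cur) :=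
      Tof_insert vis cur
    refine ⟨by rw [ihk, hkeys2], ?_, ?_, ?_⟩
    · -- the visited-set identity
      intro x
      rw [ihT x]
      constructor
      · rintro (h2 | ⟨s, hs, hRA⟩)
        · rcases (hTof2 x).1 h2 with h3 | rfl
          · exact Or.inl h3
          · exact Or.inr ⟨x, List.mem_cons_self, ⟨hcurT, Relation.ReflTransGen.refl⟩⟩
        · have hRA' : RA (pvRel E) (fun z => Tof vis z ∨ z = cur) s x :=
            (RA_congr _ _ _ s x hTof2).1 hRA
          rcases List.mem_append.1 hs with hsnb | hsrest
          · have hr : pvRel E cur s := (H1 cur s).1 hsnb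
            exact Or.inr ⟨cur, List.mem_cons_self,
              (RA_hub (pvRel E) (Tof vis) cur x hcurT).2 (Or.inr ⟨s, hr, hRA'⟩)⟩
          · exact Or.inr ⟨s, List.mem_cons_of_mem _ hsrest,
              RA_mono _ _ _ s x (fun z hz => Or.inl hz) hRA'⟩
      · rintro (h2 | ⟨s, hs, hRA⟩)
        · exact Or.inl ((hTof2 x).2 (Or.inl h2))
        · rcases List.mem_cons.1 hs with rfl | hsrest
          · rcases (RA_hub (pvRel E) (Tof vis) s x hcurT).1 hRA with rfl | ⟨y, hry, hRA'⟩
            · exact Or.inl ((hTof2 x).2 (Or.inr rfl))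
            · exact Or.inr ⟨y, List.mem_append_left _ ((H1 s y).2 hry),
                (RA_congr _ _ _ y x hTof2).2 hRA'⟩
          · rcases RA_shift (pvRel E) (Tof vis) cur s x hcurT hRA with hL | hR
            · exact Or.inr ⟨s, List.mem_append_right _ hsrest,
                (RA_congr _ _ _ s x hTof2).2 hL⟩
            · rcases (RA_hub (pvRel E) (Tof vis) cur x hcurT).1 hR with rfl | ⟨y, hry, hRA'⟩
              · exact Or.inl ((hTof2 x).2 (Or.inr rfl))
              · exact Or.inr ⟨y, List.mem_append_left _ ((H1 cur y).2 hry),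
                  (RA_congr _ _ _ y x hTof2).2 hRA'⟩
    · have hneg := negTrue_insert vis cur h
      by_cases hsign : cur < 0 <;> simp only [hsign, if_true, if_false] at ihc1 hneg ⊢ <;> omega
    · have hpos := posTrue_insert vis cur h
      by_cases hsign : cur < 0 <;> simp only [hsign, if_true, if_false] at ihc2 hpos ⊢ <;> omega
  | case3 vis count cur rest h ih =>
    intro hcont hnd hstack
    have hne : vis.get? cur ≠ some false := fun hh => h hh
    obtain ⟨ihk, ihT, ihc1, ihc2⟩ := ih hcont hnd
      (fun s hs => hstack s (List.mem_cons_of_mem _ hs))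
    have hcurT : Tof vis cur := by
      have hc : vis.contains cur = true := (hcont cur).2 (hstack cur List.mem_cons_self)
      rw [PySem.Dict.contains_eq_isSome_get?] at hc
      rcases hv : vis.get? cur with - | b
      · rw [hv] at hc; simp at hc
      · cases b
        · exact absurd hv hne
        · exact hv
    rw [dfsGo_cons_skip adj cur rest vis count hne]
    refine ⟨ihk, ?_, ihc1, ihc2⟩
    intro x
    rw [ihT x]
    constructor
    · rintro (h2 | ⟨s, hs, hRA⟩)
      · exact Or.inl h2
      · exact Or.inr ⟨s, List.mem_cons_of_mem _ hs, hRA⟩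
    · rintro (h2 | ⟨s, hs, hRA⟩)
      · exact Or.inl h2
      · rcases List.mem_cons.1 hs with rfl | hsrest
        · exact absurd hcurT hRA.1
        · exact Or.inr ⟨s, hsrest, hRA⟩

lemma T_closed_conn (E : List (Int × List Int)) (T : Int → Prop)
    (hcl : ∀ a b, T a → pvRel E a b → T b) (x y : Int) (h : pvConn E x y) (hx : T x) : T y := by
  induction h with
  | refl => exact hx
  | tail _ hzw ih => exact hcl _ _ ih hzw

lemma compF_congr (E : List (Int × List Int)) (k x : Int) (h : pvConn E k x) :
    compF E x = compF E k := by
  unfold compF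
  ext y
  simp only [Finset.mem_filter]
  constructor
  · rintro ⟨hy, hc⟩
    exact ⟨hy, h.trans hc⟩
  · rintro ⟨hy, hc⟩
    exact ⟨hy, (pvConn_symm E k x h).trans hc⟩

lemma pvCond_congr (E : List (Int × List Int)) (k x : Int) (h : pvConn E k x)
    (hk : pvCond E k) : pvCond E x := by
  unfold pvCond
  rw [compF_congr E k x h]
  exact hk

lemma trueCard_split (E : List (Int × List Int)) (vis vis' : PySem.Dict Int Bool) (k : Int)
    (pb : Int → Prop) [DecidablePred pb]
    (hkeys : vis'.keys = vis.keys)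
    (hcont : ∀ x, vis.contains x = true ↔ pvNode E x)
    (hT' : ∀ x, Tof vis' x ↔ (Tof vis x ∨ pvConn E k x))
    (hdisj : ∀ x, pvConn E k x → ¬ Tof vis x) :
    ((vis'.keys.toFinset).filter (fun x => vis'.get? x = some true ∧ pb x)).card
      = ((vis.keys.toFinset).filter (fun x => vis.get? x = some true ∧ pb x)).card
        + (((compF E k).filter (fun x => pb x)).card) := by
  have hKnode : ∀ x, x ∈ vis.keys.toFinset ↔ pvNode E x := by
    intro x
    rw [List.mem_toFinset, ← PySem.Dict.contains_iff_mem_keys]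
    exact hcont x
  have hsplit : ((vis'.keys.toFinset).filter (fun x => vis'.get? x = some true ∧ pb x))
      = ((vis.keys.toFinset).filter (fun x => vis.get? x = some true ∧ pb x))
        ∪ ((compF E k).filter (fun x => pb x)) := by
    ext x
    simp only [Finset.mem_union, Finset.mem_filter, hkeys]
    have hcomp : x ∈ compF E k ↔ (pvNode E x ∧ pvConn E k x) := by
      unfold compF
      simp only [Finset.mem_filter, List.mem_toFinset]
      exact Iff.rfl
    constructor
    · rintro ⟨hxK, hxT', hpb⟩
      rcases (hT' x).1 hxT' with hxT | hxc
      · exact Or.inl ⟨hxK, hxT, hpb⟩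
      · exact Or.inr ⟨hcomp.2 ⟨(hKnode x).1 hxK, hxc⟩, hpb⟩
    · rintro (⟨hxK, hxT, hpb⟩ | ⟨hxc, hpb⟩)
      · exact ⟨hxK, (hT' x).2 (Or.inl hxT), hpb⟩
      · obtain ⟨hnode, hconn⟩ := hcomp.1 hxc
        exact ⟨(hKnode x).2 hnode, (hT' x).2 (Or.inr hconn), hpb⟩
  rw [hsplit, Finset.card_union_of_disjoint]
  rw [Finset.disjoint_left]
  rintro x hx hx'
  simp only [Finset.mem_filter] at hx hx'
  have hconn : pvConn E k x := by
    have := hx'.1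
    unfold compF at this
    simp only [Finset.mem_filter] at this
    exact this.2
  exact hdisj x hconn hx.2.1

lemma checkLoop_spec (E : List (Int × List Int)) (adj : PySem.Dict Int (PySem.Set Int))
    (H1 : ∀ x y, y ∈ adj.getD x PySem.Set.empty ↔ pvRel E x y) :
    ∀ (ks : List Int) (vis : PySem.Dict Int Bool),
    (∀ x, vis.contains x = true ↔ pvNode E x) →
    vis.keys.Nodup →
    (∀ a b, Tof vis a → pvRel E a b → Tof vis b) →
    (∀ x, Tof vis x → pvCond E x) →
    (∀ k ∈ ks, pvNode E k) →
    (checkLoop adj vis ks = true ↔ ∀ k ∈ ks, pvCond E k) := by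
  intro ks
  induction ks with
  | nil => intro vis _ _ _ _ _; simp [checkLoop]
  | cons k rest ih =>
    intro vis hcont hnd hclosed hTcond hks
    have hknode : pvNode E k := hks k List.mem_cons_self
    have hkc : vis.contains k = true := (hcont k).2 hknode
    rw [PySem.Dict.contains_eq_isSome_get?] at hkc
    obtain ⟨b, hb⟩ : ∃ b, vis.get? k = some b := by
      rcases hv : vis.get? k with - | b
      · rw [hv] at hkc; simp at hkc
      · exact ⟨b, rfl⟩
    have hgetD : vis.getD k false = b := by
      rw [PySem.Dict.getD_eq_get?_getD, hb]; rfl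
    cases b with
    | true =>
      -- already visited: its component was checked before
      have hTk : Tof vis k := hb
      rw [show checkLoop adj vis (k :: rest) = checkLoop adj vis rest by
        rw [checkLoop]; simp [hgetD]]
      rw [ih vis hcont hnd hclosed hTcond (fun s hs => hks s (List.mem_cons_of_mem _ hs))]
      constructor
      · intro hall
        intro k' hk'
        rcases List.mem_cons.1 hk' with rfl | hk'
        · exact hTcond k' hTk
        · exact hall k' hk'
      · intro hall k' hk'
        exact hall k' (List.mem_cons_of_mem _ hk')
    | false =>
      have hTk : ¬ Tof vis k := by unfold Tof; rw [hb]; simp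
      obtain ⟨hkeys', hT', hc1, hc2⟩ := dfsGo_spec E adj H1 [k] vis (0, 0) hcont hnd
        (by intro s hs; rw [List.mem_singleton] at hs; subst hs; exact hknode)
      set res := dfsGo adj [k] vis (0, 0) with hres
      have hT'conn : ∀ x, Tof res.1 x ↔ (Tof vis x ∨ pvConn E k x) := by
        intro x
        rw [hT' x]
        have : (∃ s ∈ [k], RA (pvRel E) (Tof vis) s x) ↔ RA (pvRel E) (Tof vis) k x := by
          simp
        rw [this, RA_closed (pvRel E) (Tof vis) k x (pvRel_symm E) hclosed hTk]
        exact Iff.rfl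
      have hdisj : ∀ x, pvConn E k x → ¬ Tof vis x := by
        intro x hconn hTx
        exact hTk (T_closed_conn E (Tof vis) hclosed x k
          (pvConn_symm E k x hconn) hTx)
      have hnegEq : (negTrue res.1 : Int)
          = negTrue vis + ((compF E k).filter (fun x => x < 0)).card := by
        unfold negTrue
        rw [trueCard_split E vis res.1 k (fun x => x < 0) hkeys' hcont hT'conn hdisj]
        push_cast; ring
      have hposEq : (posTrue res.1 : Int)
          = posTrue vis + ((compF E k).filter (fun x => 0 ≤ x)).card := by
        unfold posTrue
        rw [trueCard_split E vis res.1 k (fun x => 0 ≤ x) hkeys' hcont hT'conn hdisj]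
        push_cast; ring
      have hcondIff : (decide (res.2.1 ≥ res.2.2) = true) ↔ pvCond E k := by
        rw [decide_eq_true_iff]
        unfold pvCond
        rw [hc1, hc2, hnegEq, hposEq]
        constructor <;> intro hcmp <;> omega
      rw [show checkLoop adj vis (k :: rest) =
          (if (depthFirstSearch k adj vis).2 then checkLoop adj (depthFirstSearch k adj vis).1 rest
           else false) by rw [checkLoop]; simp [hgetD]]
      have hdfs1 : (depthFirstSearch k adj vis).1 = res.1 := rfl
      have hdfs2 : (depthFirstSearch k adj vis).2 = decide (res.2.1 ≥ res.2.2) := rfl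
      rw [hdfs1, hdfs2]
      by_cases hcondk : pvCond E k
      · rw [if_pos (hcondIff.2 hcondk)]
        have hcont' : ∀ x, res.1.contains x = true ↔ pvNode E x := by
          intro x
          rw [PySem.Dict.contains_iff_mem_keys, hkeys', ← PySem.Dict.contains_iff_mem_keys]
          exact hcont x
        have hnd' : res.1.keys.Nodup := by rwa [hkeys']
        have hclosed' : ∀ a b, Tof res.1 a → pvRel E a b → Tof res.1 b := by
          intro a b hTa hrel
          rcases (hT'conn a).1 hTa with hTa | hca
          · exact (hT'conn b).2 (Or.inl (hclosed a b hTa hrel))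
          · exact (hT'conn b).2 (Or.inr (hca.tail hrel))
        have hTcond' : ∀ x, Tof res.1 x → pvCond E x := by
          intro x hTx
          rcases (hT'conn x).1 hTx with hTx | hcx
          · exact hTcond x hTx
          · exact pvCond_congr E k x hcx hcondk
        rw [ih res.1 hcont' hnd' hclosed' hTcond'
          (fun s hs => hks s (List.mem_cons_of_mem _ hs))]
        constructor
        · intro hall k' hk'
          rcases List.mem_cons.1 hk' with rfl | hk'
          · exact hcondk
          · exact hall k' hk'
        · intro hall k' hk'
          exact hall k' (List.mem_cons_of_mem _ hk')
      · rw [if_neg (fun hh => hcondk (hcondIff.1 hh))]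
        constructor
        · intro hff; exact absurd hff (by simp)
        · intro hall
          exact absurd (hall k List.mem_cons_self) hcondk

-- ===== side A: the build loop =====
def stepP (st : PySem.Dict Int (PySem.Set Int) × PySem.Dict Int Bool) (p : Int × List Int) :
    PySem.Dict Int (PySem.Set Int) × PySem.Dict Int Bool :=
  p.2.foldl (buildIdStep p.1) (st.1.insert (p.1 * -1 - 1) PySem.Set.empty, st.2)

def StOK (ps : List (Int × List Int))
    (st : PySem.Dict Int (PySem.Set Int) × PySem.Dict Int Bool) : Prop :=
  st.2.keys.Nodup ∧
  (∀ x : Int, pvNode ps x → st.2.get? x = some false) ∧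
  (∀ x : Int, ¬ pvNode ps x → st.2.get? x = none) ∧
  (∀ x y : Int, y ∈ st.1.getD x PySem.Set.empty ↔ pvRel ps x y) ∧
  (∀ x : Int, st.1.contains x = true → (pvNode ps x ∨ ∃ p ∈ ps, x = p.1 * -1 - 1))

-- invariant of the inner 'for id in temp_set' loop after processing the prefix 'done'
def InnerOK (ps : List (Int × List Int)) (i : Int) (done : List Int)
    (st : PySem.Dict Int (PySem.Set Int) × PySem.Dict Int Bool) : Prop :=
  st.2.keys.Nodup ∧
  (∀ x : Int, (pvNode ps x ∨ (done ≠ [] ∧ x = i * -1 - 1) ∨ x ∈ done) →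
      st.2.get? x = some false) ∧
  (∀ x : Int, ¬ (pvNode ps x ∨ (done ≠ [] ∧ x = i * -1 - 1) ∨ x ∈ done) →
      st.2.get? x = none) ∧
  (∀ x y : Int, y ∈ st.1.getD x PySem.Set.empty ↔
      (pvRel ps x y ∨ (x = i * -1 - 1 ∧ y ∈ done) ∨ (y = i * -1 - 1 ∧ x ∈ done))) ∧
  (∀ x : Int, st.1.contains x = true →
      (pvNode ps x ∨ (∃ q ∈ ps, x = q.1 * -1 - 1) ∨ x = i * -1 - 1 ∨ x ∈ done)) ∧
  st.1.contains (i * -1 - 1) = true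

lemma hub_fresh (ps : List (Int × List Int)) (i : Int)
    (hidx : ∀ q ∈ ps, q.1 ≠ i) (hpre : ∀ q ∈ ps, (i * -1 - 1) ∉ q.2) :
    ∀ y, ¬ pvRel ps (i * -1 - 1) y := by
  rintro y ⟨q, hq, ⟨hx, -⟩ | ⟨-, hx⟩⟩
  · exact hidx q hq (by omega)
  · exact hpre q hq hx

lemma inner_step (ps : List (Int × List Int)) (i : Int) (done : List Int) (id : Int)
    (st : PySem.Dict Int (PySem.Set Int) × PySem.Dict Int Bool)
    (hfresh : ∀ y, ¬ pvRel ps (i * -1 - 1) y)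
    (h : InnerOK ps i done st) :
    InnerOK ps i (done ++ [id]) (buildIdStep i st id) := by
  obtain ⟨hnd, hsome, hnone, hmem, hcontc, hhub⟩ := h
  have hvis : ∀ x : Int,
      ((st.2.insert (i * -1 - 1) false).insert id false).get? x
        = if x = id ∨ x = i * -1 - 1 then some false else st.2.get? x := by
    intro x
    rw [PySem.Dict.get?_insert, PySem.Dict.get?_insert]
    by_cases h1 : x = id <;> by_cases h2 : x = i * -1 - 1 <;> simp [h1, h2]
  have hviskeys : ((st.2.insert (i * -1 - 1) false).insert id false).keys.Nodup :=
    PySem.Dict.nodup_keys_insert _ _ _ (PySem.Dict.nodup_keys_insert _ _ _ hnd)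
  have hSome' : ∀ x : Int,
      (pvNode ps x ∨ (done ++ [id] ≠ [] ∧ x = i * -1 - 1) ∨ x ∈ done ++ [id]) →
      ((st.2.insert (i * -1 - 1) false).insert id false).get? x = some false := by
    intro x hx
    rw [hvis x]
    by_cases h1 : x = id ∨ x = i * -1 - 1
    · rw [if_pos h1]
    · rw [if_neg h1]
      refine hsome x ?_
      rcases hx with hx | ⟨-, hx⟩ | hx
      · exact Or.inl hx
      · exact absurd (Or.inr hx) h1
      · rcases List.mem_append.1 hx with hx | hx
        · exact Or.inr (Or.inr hx)
        · exact absurd (Or.inl (List.mem_singleton.1 hx)) h1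
  have hNone' : ∀ x : Int,
      ¬ (pvNode ps x ∨ (done ++ [id] ≠ [] ∧ x = i * -1 - 1) ∨ x ∈ done ++ [id]) →
      ((st.2.insert (i * -1 - 1) false).insert id false).get? x = none := by
    intro x hx
    have h1 : ¬ (x = id ∨ x = i * -1 - 1) := by
      rintro (rfl | rfl)
      · exact hx (Or.inr (Or.inr (List.mem_append_right _ (List.mem_singleton_self _))))
      · exact hx (Or.inr (Or.inl ⟨by simp, rfl⟩))
    rw [hvis x, if_neg h1]
    refine hnone x ?_
    rintro (hc | ⟨-, hc⟩ | hc)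
    · exact hx (Or.inl hc)
    · exact h1 (Or.inr hc)
    · exact hx (Or.inr (Or.inr (List.mem_append_left _ hc)))
  -- the adjacency update is the same in both branches of buildIdStep, membership-wise
  have hmemGoal : ∀ (adj' : PySem.Dict Int (PySem.Set Int)),
      (∀ x y : Int, y ∈ adj'.getD x PySem.Set.empty ↔
        (pvRel ps x y ∨ (x = i * -1 - 1 ∧ y ∈ done ++ [id]) ∨
          (y = i * -1 - 1 ∧ x ∈ done ++ [id]))) ↔
      (∀ x y : Int, y ∈ adj'.getD x PySem.Set.empty ↔
        ((pvRel ps x y ∨ (x = i * -1 - 1 ∧ y ∈ done) ∨ (y = i * -1 - 1 ∧ x ∈ done)) ∨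
          (x = i * -1 - 1 ∧ y = id) ∨ (y = i * -1 - 1 ∧ x = id))) := by
    intro adj'
    refine forall_congr' fun x => forall_congr' fun y => ?_
    refine iff_congr Iff.rfl ?_
    simp only [List.mem_append, List.mem_singleton]
    tauto
  unfold buildIdStep
  by_cases hcont : st.1.contains id = false
  · rw [if_pos hcont]
    have hidhub : id ≠ i * -1 - 1 := by
      intro hh
      rw [hh, hhub] at hcont
      exact absurd hcont (by simp)
    have hgetDid : st.1.getD id PySem.Set.empty = PySem.Set.empty :=
      PySem.Dict.getD_of_not_contains st.1 PySem.Set.empty hcont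
    have hidnew : ∀ y, ¬ (pvRel ps id y ∨ (id = i * -1 - 1 ∧ y ∈ done) ∨
        (y = i * -1 - 1 ∧ id ∈ done)) := by
      intro y hy
      have hmm := (hmem id y).2 hy
      rw [hgetDid] at hmm
      exact absurd hmm (List.not_mem_nil)
    refine ⟨hviskeys, hSome', hNone', ?_, ?_, ?_⟩
    · rw [hmemGoal]
      intro x y
      simp only [PySem.Dict.getD_modify, PySem.Dict.getD_insert]
      by_cases hx1 : x = i * -1 - 1
      · have hne : ¬ (i * -1 - 1 = id) := fun hh => hidhub hh.symm
        rw [hx1, if_pos rfl, if_neg hne]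
        rw [PySem.Set.mem_add, hmem]
        have := hidnew y
        clear hvis hviskeys hSome' hNone' hmemGoal hsome hnone hcontc hnd hhub hfresh hmem hcont hgetDid hidnew
        tauto
      · rw [if_neg hx1]
        by_cases hx2 : x = id
        · rw [hx2, if_pos rfl]
          rw [PySem.Set.mem_add]
          have hnil : ¬ y ∈ (PySem.Set.empty : PySem.Set Int) := List.not_mem_nil
          have := hidnew y
          clear hvis hviskeys hSome' hNone' hmemGoal hsome hnone hcontc hnd hhub hfresh hmem hcont hgetDid hidnew
          tauto
        · rw [if_neg hx2, hmem]
          clear hvis hviskeys hSome' hNone' hmemGoal hsome hnone hcontc hnd hhub hfresh hmem hcont hgetDid hidnew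
          tauto
    · intro x hx
      rw [PySem.Dict.contains_modify, PySem.Dict.contains_insert] at hx
      rcases Bool.or_eq_true_iff.1 hx with hx | hx
      · exact Or.inr (Or.inr (Or.inl (by simpa using hx)))
      · rcases Bool.or_eq_true_iff.1 hx with hx | hx
        · exact Or.inr (Or.inr (Or.inr (List.mem_append_right _
            (List.mem_singleton.2 (by simpa using hx)))))
        · rcases hcontc x hx with hc | hc | hc | hc
          · exact Or.inl hc
          · exact Or.inr (Or.inl hc)
          · exact Or.inr (Or.inr (Or.inl hc))
          · exact Or.inr (Or.inr (Or.inr (List.mem_append_left _ hc)))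
    · rw [PySem.Dict.contains_modify]
      simp only [beq_self_eq_true, Bool.true_or]
  · rw [if_neg hcont]
    have hcont' : st.1.contains id = true := by
      cases hc : st.1.contains id
      · exact absurd hc hcont
      · rfl
    refine ⟨hviskeys, hSome', hNone', ?_, ?_, ?_⟩
    · rw [hmemGoal]
      intro x y
      simp only [PySem.Dict.getD_modify]
      by_cases hx1 : x = i * -1 - 1
      · rw [hx1, if_pos rfl]
        by_cases hidh : i * -1 - 1 = id
        · rw [if_pos hidh, hidh]
          rw [PySem.Set.mem_add, PySem.Set.mem_add, hmem]
          have hidh2 := hidh.symm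
          rw [hidh2]
          clear hvis hviskeys hSome' hNone' hmemGoal hsome hnone hcontc hnd hhub hfresh hmem hcont hcont'
          tauto
        · rw [if_neg hidh]
          rw [PySem.Set.mem_add, hmem]
          clear hvis hviskeys hSome' hNone' hmemGoal hsome hnone hcontc hnd hhub hfresh hmem hcont hcont'
          tauto
      · rw [if_neg hx1]
        by_cases hx2 : x = id
        · rw [hx2, if_pos rfl]
          rw [PySem.Set.mem_add, hmem]
          have hidh' : ¬ id = i * -1 - 1 := fun hh => hx1 (hx2.trans hh)
          clear hvis hviskeys hSome' hNone' hmemGoal hsome hnone hcontc hnd hhub hfresh hmem hcont hcont'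
          tauto
        · rw [if_neg hx2, hmem]
          clear hvis hviskeys hSome' hNone' hmemGoal hsome hnone hcontc hnd hhub hfresh hmem hcont hcont'
          tauto
    · intro x hx
      rw [PySem.Dict.contains_modify, PySem.Dict.contains_modify] at hx
      rcases Bool.or_eq_true_iff.1 hx with hx | hx
      · exact Or.inr (Or.inr (Or.inl (by simpa using hx)))
      · rcases Bool.or_eq_true_iff.1 hx with hx | hx
        · exact Or.inr (Or.inr (Or.inr (List.mem_append_right _
            (List.mem_singleton.2 (by simpa using hx)))))
        · rcases hcontc x hx with hc | hc | hc | hc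
          · exact Or.inl hc
          · exact Or.inr (Or.inl hc)
          · exact Or.inr (Or.inr (Or.inl hc))
          · exact Or.inr (Or.inr (Or.inr (List.mem_append_left _ hc)))
    · rw [PySem.Dict.contains_modify]
      simp only [beq_self_eq_true, Bool.true_or]

lemma inner_fold (ps : List (Int × List Int)) (i : Int)
    (hfresh : ∀ y, ¬ pvRel ps (i * -1 - 1) y) :
    ∀ (ids done : List Int) (st : PySem.Dict Int (PySem.Set Int) × PySem.Dict Int Bool),
    InnerOK ps i done st → InnerOK ps i (done ++ ids) (ids.foldl (buildIdStep i) st) := by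
  intro ids
  induction ids with
  | nil => intro done st h; simpa using h
  | cons id rest ih =>
    intro done st h
    have h1 := inner_step ps i done id st hfresh h
    have h2 := ih (done ++ [id]) _ h1
    simpa using h2

lemma build_StOK (ps : List (Int × List Int))
    (hpre : ∀ q ∈ ps, ∀ p ∈ ps, q.1 < p.1 → (p.1 * -1 - 1) ∉ q.2)
    (hpw : ps.Pairwise (fun q p => q.1 < p.1)) :
    StOK ps (ps.foldl stepP (PySem.Dict.empty, PySem.Dict.empty)) := by
  induction ps using List.reverseRecOn with
  | nil =>
    simp only [List.foldl_nil]
    refine ⟨PySem.Dict.nodup_keys_empty, ?_, ?_, ?_, ?_⟩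
    · intro x hx
      rw [mem_nodeList] at hx
      obtain ⟨p, hp, -⟩ := hx
      exact absurd hp (List.not_mem_nil)
    · intro x _
      exact PySem.Dict.get?_empty x
    · intro x y
      rw [PySem.Dict.getD_empty]
      constructor
      · intro hy; exact absurd hy (List.not_mem_nil)
      · rintro ⟨q, hq, -⟩; exact absurd hq (List.not_mem_nil)
    · intro x hx
      rw [PySem.Dict.contains_empty] at hx
      exact absurd hx (by simp)
  | append_singleton ps p ih =>
    have hordered : ∀ q ∈ ps, q.1 < p.1 := by
      intro q hq
      exact (List.pairwise_append.1 hpw).2.2 q hq p (List.mem_singleton_self p)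
    have hidx : ∀ q ∈ ps, q.1 ≠ p.1 := fun q hq => ne_of_lt (hordered q hq)
    have hsteppre : ∀ q ∈ ps, (p.1 * -1 - 1) ∉ q.2 := by
      intro q hq
      exact hpre q (List.mem_append_left _ hq) p
        (List.mem_append_right _ (List.mem_singleton_self p)) (hordered q hq)
    have hfresh := hub_fresh ps p.1 hidx hsteppre
    have hIH : StOK ps (ps.foldl stepP (PySem.Dict.empty, PySem.Dict.empty)) := by
      refine ih ?_ (List.pairwise_append.1 hpw).1
      intro q hq p' hp' hlt
      exact hpre q (List.mem_append_left _ hq) p' (List.mem_append_left _ hp') hlt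
    set st := ps.foldl stepP (PySem.Dict.empty, PySem.Dict.empty) with hst
    obtain ⟨hnd, hsome, hnone, hmem, hcontc⟩ := hIH
    have hInit : InnerOK ps p.1 []
        (st.1.insert (p.1 * -1 - 1) PySem.Set.empty, st.2) := by
      refine ⟨hnd, ?_, ?_, ?_, ?_, PySem.Dict.contains_insert_self _ _ _⟩
      · intro x hx
        refine hsome x ?_
        rcases hx with hx | ⟨hne, -⟩ | hx
        · exact hx
        · exact absurd rfl hne
        · exact absurd hx (List.not_mem_nil)
      · intro x hx
        exact hnone x (fun hc => hx (Or.inl hc))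
      · intro x y
        rw [PySem.Dict.getD_insert]
        by_cases hx1 : x = p.1 * -1 - 1
        · rw [if_pos hx1, hx1]
          constructor
          · intro hy; exact absurd hy (List.not_mem_nil)
          · rintro (hc | ⟨-, hc⟩ | ⟨-, hc⟩)
            · exact absurd hc (hfresh y)
            · exact absurd hc (List.not_mem_nil)
            · exact absurd hc (List.not_mem_nil)
        · rw [if_neg hx1, hmem]
          constructor
          · exact fun hc => Or.inl hc
          · rintro (hc | ⟨hc, -⟩ | ⟨-, hc⟩)
            · exact hc
            · exact absurd hc hx1
            · exact absurd hc (List.not_mem_nil)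
      · intro x hx
        rw [PySem.Dict.contains_insert] at hx
        rcases Bool.or_eq_true_iff.1 hx with hx | hx
        · exact Or.inr (Or.inr (Or.inl (by simpa using hx)))
        · rcases hcontc x hx with hc | hc
          · exact Or.inl hc
          · exact Or.inr (Or.inl hc)
    have hFin := inner_fold ps p.1 hfresh p.2 [] _ hInit
    rw [List.nil_append] at hFin
    obtain ⟨hnd', hsome', hnone', hmem', hcontc', -⟩ := hFin
    rw [List.foldl_append]
    have hred : List.foldl stepP st [p]
        = p.2.foldl (buildIdStep p.1) (st.1.insert (p.1 * -1 - 1) PySem.Set.empty, st.2) := rfl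
    rw [hred]
    refine ⟨hnd', ?_, ?_, ?_, ?_⟩
    · intro x hx
      refine hsome' x ?_
      rw [node_append] at hx
      rcases hx with hx | ⟨hne, hx | hx⟩
      · exact Or.inl hx
      · exact Or.inr (Or.inl ⟨hne, hx⟩)
      · exact Or.inr (Or.inr hx)
    · intro x hx
      refine hnone' x ?_
      rw [node_append] at hx
      rintro (hc | ⟨hne, hc⟩ | hc)
      · exact hx (Or.inl hc)
      · exact hx (Or.inr ⟨hne, Or.inl hc⟩)
      · exact hx (Or.inr ⟨List.ne_nil_of_mem hc, Or.inr hc⟩)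
    · intro x y
      rw [hmem' x y, rel_append]
    · intro x hx
      rcases hcontc' x hx with hc | ⟨q, hq, hc⟩ | hc | hc
      · exact Or.inl ((node_append ps p x).2 (Or.inl hc))
      · exact Or.inr ⟨q, List.mem_append_left _ hq, hc⟩
      · exact Or.inr ⟨p, List.mem_append_right _ (List.mem_singleton_self p), hc⟩
      · exact Or.inl ((node_append ps p x).2
          (Or.inr ⟨List.ne_nil_of_mem hc, Or.inr hc⟩))

lemma A_iff (ls : List (List Int)) (hpre : Pre_validMutationList ls) :
    (validMutationList ls = true ↔ pvGood (PySem.List.enumerate ls 0)) := by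
  have hfold : (PySem.List.pyRange 0 (PySem.List.len ls) 1).foldl (buildStep ls)
        (PySem.Dict.empty, PySem.Dict.empty)
      = (PySem.List.enumerate ls 0).foldl stepP (PySem.Dict.empty, PySem.Dict.empty) := by
    rw [PySem.List.enumerate_eq_map_pyRange ls [], List.foldl_map]
    rfl
  have hpreE : ∀ q ∈ PySem.List.enumerate ls 0, ∀ p ∈ PySem.List.enumerate ls 0,
      q.1 < p.1 → (p.1 * -1 - 1) ∉ q.2 := by
    intro q hq p hp hlt
    rw [PySem.List.mem_enumerate_iff] at hq hp
    obtain ⟨k, hk, rfl⟩ := hq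
    obtain ⟨m, hm, rfl⟩ := hp
    simp only [zero_add] at hlt ⊢
    have hkm : k < m := by exact_mod_cast hlt
    have := hpre m hm k hkm
    rw [List.getD_eq_getElem ls [] hk] at this
    intro hmem
    refine this ?_
    have harith : ((m : Int)) * -1 - 1 = -(m : Int) - 1 := by ring
    rw [harith] at hmem
    exact hmem
  have hSt := build_StOK (PySem.List.enumerate ls 0) hpreE
    (PySem.List.pairwise_lt_enumerate ls 0)
  set E := PySem.List.enumerate ls 0 with hE
  set st := E.foldl stepP (PySem.Dict.empty, PySem.Dict.empty) with hst
  obtain ⟨hnd, hsome, hnone, hmem, -⟩ := hSt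
  have hcont : ∀ x, st.2.contains x = true ↔ pvNode E x := by
    intro x
    rw [PySem.Dict.contains_eq_isSome_get?]
    by_cases hx : pvNode E x
    · rw [hsome x hx]; simp [hx]
    · rw [hnone x hx]; simp [hx]
  have hnoT : ∀ x, ¬ Tof st.2 x := by
    intro x hT
    unfold Tof at hT
    by_cases hx : pvNode E x
    · rw [hsome x hx] at hT; simp at hT
    · rw [hnone x hx] at hT; simp at hT
  have hloop := checkLoop_spec E st.1 hmem st.2.keys st.2 hcont hnd
    (fun a b hTa _ => absurd hTa (hnoT a))
    (fun x hTx => absurd hTx (hnoT x))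
    (fun k hk => (hcont k).1 ((PySem.Dict.contains_iff_mem_keys st.2 k).2 hk))
  have hvm : validMutationList ls = checkLoop st.1 st.2 st.2.keys := by
    unfold validMutationList
    rw [hfold]
  rw [hvm, hloop]
  unfold pvGood
  constructor
  · intro hall v hv
    exact hall v ((PySem.Dict.contains_iff_mem_keys st.2 v).1 ((hcont v).2 hv))
  · intro hall k hk
    exact hall k ((hcont k).1 ((PySem.Dict.contains_iff_mem_keys st.2 k).2 hk))

-- ===== side B: the merge loop =====
def PartOK (ps : List (Int × List Int)) (cs : List (PySem.Set Int)) : Prop :=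
  (∀ c ∈ cs, c.Nodup ∧ c ≠ []) ∧
  (∀ c ∈ cs, ∀ x ∈ c, pvNode ps x) ∧
  (∀ x, pvNode ps x → ∃ c ∈ cs, x ∈ c) ∧
  (∀ c ∈ cs, ∀ x ∈ c, ∀ y, (y ∈ c ↔ (pvNode ps y ∧ pvConn ps x y)))

-- the inner fold of altMergeStep: merged set and untouched rest
lemma mergeFold (star : PySem.Set Int) (cs : List (PySem.Set Int)) :
    ∀ (acc1 : PySem.Set Int) (acc2 : List (PySem.Set Int)),
    (∀ y, y ∈ (cs.foldl
        (fun (mr : PySem.Set Int × List (PySem.Set Int)) comp =>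
          if PySem.Set.inter comp star ≠ [] then (PySem.Set.union mr.1 comp, mr.2)
          else (mr.1, mr.2 ++ [comp])) (acc1, acc2)).1
      ↔ (y ∈ acc1 ∨ ∃ c ∈ cs, PySem.Set.inter c star ≠ [] ∧ y ∈ c)) ∧
    ((cs.foldl
        (fun (mr : PySem.Set Int × List (PySem.Set Int)) comp =>
          if PySem.Set.inter comp star ≠ [] then (PySem.Set.union mr.1 comp, mr.2)
          else (mr.1, mr.2 ++ [comp])) (acc1, acc2)).2
      = acc2 ++ cs.filter (fun c => decide (PySem.Set.inter c star = []))) ∧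
    (acc1.Nodup → (cs.foldl
        (fun (mr : PySem.Set Int × List (PySem.Set Int)) comp =>
          if PySem.Set.inter comp star ≠ [] then (PySem.Set.union mr.1 comp, mr.2)
          else (mr.1, mr.2 ++ [comp])) (acc1, acc2)).1.Nodup) := by
  induction cs with
  | nil => intro acc1 acc2; refine ⟨fun y => by simp, by simp, fun h => by simpa using h⟩
  | cons c cs' ih =>
    intro acc1 acc2
    by_cases hc : PySem.Set.inter c star ≠ []
    · simp only [List.foldl_cons, if_pos hc]
      obtain ⟨ih1, ih2, ih3⟩ := ih (PySem.Set.union acc1 c) acc2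
      refine ⟨?_, ?_, ?_⟩
      · intro y
        rw [ih1 y, PySem.Set.mem_union]
        constructor
        · rintro ((hy | hy) | ⟨c', hc', hcc', hy⟩)
          · exact Or.inl hy
          · exact Or.inr ⟨c, List.mem_cons_self, hc, hy⟩
          · exact Or.inr ⟨c', List.mem_cons_of_mem _ hc', hcc', hy⟩
        · rintro (hy | ⟨c', hc', hcc', hy⟩)
          · exact Or.inl (Or.inl hy)
          · rcases List.mem_cons.1 hc' with rfl | hc'
            · exact Or.inl (Or.inr hy)
            · exact Or.inr ⟨c', hc', hcc', hy⟩
      · rw [ih2]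
        have : (decide (PySem.Set.inter c star = [])) = false := by
          simpa using hc
        simp [this]
      · intro hnd
        exact ih3 (PySem.Set.nodup_union acc1 c hnd)
    · simp only [List.foldl_cons, if_neg hc]
      obtain ⟨ih1, ih2, ih3⟩ := ih acc1 (acc2 ++ [c])
      have hceq : PySem.Set.inter c star = [] := not_not.1 hc
      refine ⟨?_, ?_, ?_⟩
      · intro y
        rw [ih1 y]
        constructor
        · rintro (hy | ⟨c', hc', hcc', hy⟩)
          · exact Or.inl hy
          · exact Or.inr ⟨c', List.mem_cons_of_mem _ hc', hcc', hy⟩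
        · rintro (hy | ⟨c', hc', hcc', hy⟩)
          · exact Or.inl hy
          · rcases List.mem_cons.1 hc' with rfl | hc'
            · exact absurd hcc' (not_not.2 hceq)
            · exact Or.inr ⟨c', hc', hcc', hy⟩
      · rw [ih2]
        have : (decide (PySem.Set.inter c star = [])) = true := by
          simpa using hceq
        simp [this]
      · exact ih3

lemma partOK_step (ps : List (Int × List Int)) (p : Int × List Int)
    (cs : List (PySem.Set Int)) (h : PartOK ps cs) :
    PartOK (ps ++ [p]) (altMergeStep cs p) := by
  obtain ⟨hnd, hnodes, hcover, hcomp⟩ := h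
  by_cases hemp : p.2.isEmpty
  · -- empty sublist: nothing changes
    have hnil : p.2 = [] := List.isEmpty_iff.1 hemp
    have hnode' : ∀ x, pvNode (ps ++ [p]) x ↔ pvNode ps x := by
      intro x
      rw [node_append]
      simp [hnil]
    have hconn' : ∀ x y, pvConn (ps ++ [p]) x y ↔ pvConn ps x y := by
      intro x y
      rw [conn_append]
      constructor
      · rintro (hc | ⟨⟨a, hSa, hxa⟩, b, hSb, hyb⟩)
        · exact hc
        · rcases hSa with rfl | hSa
          · rcases hSb with rfl | hSb
            · exact hxa.trans (pvConn_symm _ _ _ hyb)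
            · rw [hnil] at hSb; exact absurd hSb (List.not_mem_nil)
          · rw [hnil] at hSa; exact absurd hSa (List.not_mem_nil)
      · exact fun hc => Or.inl hc
    unfold altMergeStep
    rw [if_pos hemp]
    refine ⟨hnd, ?_, ?_, ?_⟩
    · intro c hc x hx
      exact (hnode' x).2 (hnodes c hc x hx)
    · intro x hx
      exact hcover x ((hnode' x).1 hx)
    · intro c hc x hx y
      rw [hcomp c hc x hx y, hnode' y, hconn' x y]
  · -- a real star is merged in
    have hnnil : p.2 ≠ [] := fun hh => hemp (by rw [hh]; rfl)
    have harith : -p.1 - 1 = p.1 * -1 - 1 := by ring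
    set star := PySem.Set.add (PySem.Set.ofList p.2) (-p.1 - 1) with hstar
    have hstarmem : ∀ y, y ∈ star ↔ (y = p.1 * -1 - 1 ∨ y ∈ p.2) := by
      intro y
      rw [hstar, PySem.Set.mem_add, PySem.Set.mem_ofList, harith]
      tauto
    have hstarnd : star.Nodup := PySem.Set.nodup_add _ _ (PySem.Set.nodup_ofList p.2)
    have hdisj_iff : ∀ c : PySem.Set Int, PySem.Set.inter c star = [] ↔
        (∀ z ∈ c, ¬ (z = p.1 * -1 - 1 ∨ z ∈ p.2)) := by
      intro c
      rw [List.eq_nil_iff_forall_not_mem]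
      constructor
      · intro hall z hz hS
        exact hall z ((PySem.Set.mem_inter c star z).2 ⟨hz, (hstarmem z).2 hS⟩)
      · intro hall z hz
        obtain ⟨hz1, hz2⟩ := (PySem.Set.mem_inter c star z).1 hz
        exact hall z hz1 ((hstarmem z).1 hz2)
    unfold altMergeStep
    rw [if_neg hemp]
    obtain ⟨hm1, hm2, hm3⟩ := mergeFold (PySem.Set.add (PySem.Set.ofList p.2) (-p.1 - 1)) cs
      (PySem.Set.add (PySem.Set.ofList p.2) (-p.1 - 1)) []
    simp only [List.nil_append] at hm2
    set res := cs.foldl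
        (fun (mr : PySem.Set Int × List (PySem.Set Int)) comp =>
          if PySem.Set.inter comp (PySem.Set.add (PySem.Set.ofList p.2) (-p.1 - 1)) ≠ []
          then (PySem.Set.union mr.1 comp, mr.2)
          else (mr.1, mr.2 ++ [comp]))
        (PySem.Set.add (PySem.Set.ofList p.2) (-p.1 - 1), []) with hres
    -- anchors: every member of the merged set connects (in ps) to a star member
    have hanchor : ∀ z ∈ res.1, ∃ a, (a = p.1 * -1 - 1 ∨ a ∈ p.2) ∧ pvConn ps z a := by
      intro z hz
      rcases (hm1 z).1 hz with hz | ⟨c', hc', hcc', hz⟩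
      · exact ⟨z, (hstarmem z).1 hz, Relation.ReflTransGen.refl⟩
      · obtain ⟨w, hw⟩ := List.exists_mem_of_ne_nil _ hcc'
        obtain ⟨hw1, hw2⟩ := (PySem.Set.mem_inter _ _ w).1 hw
        exact ⟨w, (hstarmem w).1 hw2, ((hcomp c' hc' z hz w).1 hw1).2⟩
    have hmergednodes : ∀ y ∈ res.1, pvNode (ps ++ [p]) y := by
      intro y hy
      rcases (hm1 y).1 hy with hy | ⟨c', hc', -, hy⟩
      · exact (node_append ps p y).2 (Or.inr ⟨hnnil, (hstarmem y).1 hy⟩)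
      · exact (node_append ps p y).2 (Or.inl (hnodes c' hc' y hy))
    have hstar_sub : ∀ y, (y = p.1 * -1 - 1 ∨ y ∈ p.2) → y ∈ res.1 := by
      intro y hy
      exact (hm1 y).2 (Or.inl ((hstarmem y).2 hy))
    have hold_sub : ∀ c' ∈ cs, PySem.Set.inter c' star ≠ [] → ∀ y ∈ c', y ∈ res.1 := by
      intro c' hc' hcc' y hy
      exact (hm1 y).2 (Or.inr ⟨c', hc', hcc', hy⟩)
    refine ⟨?_, ?_, ?_, ?_⟩
    · -- nodup and nonempty
      intro c hc
      rcases List.mem_append.1 hc with hc | hc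
      · rw [hm2] at hc
        exact hnd c (List.mem_of_mem_filter hc)
      · rw [List.mem_singleton.1 hc]
        refine ⟨hm3 hstarnd, ?_⟩
        intro hcnil
        have := hstar_sub (p.1 * -1 - 1) (Or.inl rfl)
        rw [hcnil] at this
        exact absurd this (List.not_mem_nil)
    · -- members are nodes
      intro c hc x hx
      rcases List.mem_append.1 hc with hc | hc
      · rw [hm2] at hc
        exact (node_append ps p x).2 (Or.inl (hnodes c (List.mem_of_mem_filter hc) x hx))
      · rw [List.mem_singleton.1 hc] at hx
        exact hmergednodes x hx
    · -- coverage
      intro x hx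
      rcases (node_append ps p x).1 hx with hx | ⟨-, hx⟩
      · obtain ⟨c, hc, hxc⟩ := hcover x hx
        by_cases hcc : PySem.Set.inter c star ≠ []
        · exact ⟨res.1, List.mem_append_right _ (List.mem_singleton_self _),
            hold_sub c hc hcc x hxc⟩
        · refine ⟨c, List.mem_append_left _ ?_, hxc⟩
          rw [hm2, List.mem_filter]
          exact ⟨hc, by simpa using not_not.1 hcc⟩
      · exact ⟨res.1, List.mem_append_right _ (List.mem_singleton_self _), hstar_sub x hx⟩
    · -- the component characterisation
      intro c hc x hx y
      rcases List.mem_append.1 hc with hc | hc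
      · -- untouched component
        rw [hm2, List.mem_filter] at hc
        obtain ⟨hccs, hcdec⟩ := hc
        have hcdisj : ∀ z ∈ c, ¬ (z = p.1 * -1 - 1 ∨ z ∈ p.2) :=
          (hdisj_iff c).1 (by simpa using hcdec)
        rw [conn_append]
        constructor
        · intro hy
          refine ⟨(node_append ps p y).2 (Or.inl (hnodes c hccs y hy)),
            Or.inl ((hcomp c hccs x hx y).1 hy).2⟩
        · rintro ⟨hynode, hconn | ⟨⟨a, hSa, hxa⟩, -⟩⟩
          · by_cases hxy : x = y
            · rw [← hxy]; exact hx
            · have hynode' : pvNode ps y := (pvConn_node ps x y hconn hxy).2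
              exact (hcomp c hccs x hx y).2 ⟨hynode', hconn⟩
          · exfalso
            by_cases hxa' : x = a
            · exact hcdisj x hx (by rw [hxa']; exact hSa)
            · have hanode : pvNode ps a := (pvConn_node ps x a hxa hxa').2
              have : a ∈ c := (hcomp c hccs x hx a).2 ⟨hanode, hxa⟩
              exact hcdisj a this hSa
      · -- the merged component
        rw [List.mem_singleton.1 hc] at hx ⊢
        rw [conn_append]
        constructor
        · intro hy
          obtain ⟨a, hSa, hxa⟩ := hanchor x hx
          obtain ⟨b, hSb, hyb⟩ := hanchor y hy
          exact ⟨hmergednodes y hy, Or.inr ⟨⟨a, hSa, hxa⟩, b, hSb, hyb⟩⟩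
        · rintro ⟨hynode, hconn | ⟨-, b, hSb, hyb⟩⟩
          · -- connected in the old graph
            by_cases hxy : x = y
            · rw [← hxy]; exact hx
            · have hynode' : pvNode ps y := (pvConn_node ps x y hconn hxy).2
              rcases (hm1 x).1 hx with hxstar | ⟨c₀, hc₀, hcc₀, hxc₀⟩
              · -- x lies in the star; it is an old node too (x ≠ y, connected)
                have hxnode : pvNode ps x := (pvConn_node ps x y hconn hxy).1
                obtain ⟨c₀, hc₀, hxc₀⟩ := hcover x hxnode
                have hcc₀ : PySem.Set.inter c₀ star ≠ [] := by
                  intro hh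
                  exact (hdisj_iff c₀).1 hh x hxc₀ ((hstarmem x).1 hxstar)
                have hyc₀ : y ∈ c₀ := (hcomp c₀ hc₀ x hxc₀ y).2 ⟨hynode', hconn⟩
                exact hold_sub c₀ hc₀ hcc₀ y hyc₀
              · have hyc₀ : y ∈ c₀ := (hcomp c₀ hc₀ x hxc₀ y).2 ⟨hynode', hconn⟩
                exact hold_sub c₀ hc₀ hcc₀ y hyc₀
          · -- y anchored to the star
            by_cases hyb' : y = b
            · exact hstar_sub y (by rw [hyb']; exact hSb)
            · have hynode' : pvNode ps y := (pvConn_node ps y b hyb hyb').1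
              obtain ⟨c₀, hc₀, hyc₀⟩ := hcover y hynode'
              have hbc₀ : b ∈ c₀ := (hcomp c₀ hc₀ y hyc₀ b).2
                ⟨(pvConn_node ps y b hyb hyb').2, hyb⟩
              have hcc₀ : PySem.Set.inter c₀ star ≠ [] := by
                intro hh
                exact (hdisj_iff c₀).1 hh b hbc₀ hSb
              exact hold_sub c₀ hc₀ hcc₀ y hyc₀

lemma partOK_fold (ps : List (Int × List Int)) : PartOK ps (ps.foldl altMergeStep []) := by
  induction ps using List.reverseRecOn with
  | nil =>
    refine ⟨fun c hc => absurd hc (List.not_mem_nil), fun c hc => absurd hc (List.not_mem_nil),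
      ?_, fun c hc => absurd hc (List.not_mem_nil)⟩
    intro x hx
    rw [mem_nodeList] at hx
    obtain ⟨p, hp, -⟩ := hx
    exact absurd hp (List.not_mem_nil)
  | append_singleton ps p ih =>
    rw [List.foldl_append, List.foldl_cons, List.foldl_nil]
    exact partOK_step ps p _ ih

lemma count_comp (E : List (Int × List Int)) (c : List Int) (x : Int)
    (P : Int → Prop) [DecidablePred P] (hndc : c.Nodup)
    (hmemc : ∀ y, y ∈ c ↔ (pvNode E y ∧ pvConn E x y)) :
    c.countP (fun z => decide (P z)) = ((compF E x).filter P).card := by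
  rw [List.countP_eq_length_filter]
  have hnd2 : (c.filter (fun z => decide (P z))).Nodup := hndc.filter _
  rw [← List.toFinset_card_of_nodup hnd2]
  congr 1
  ext z
  simp only [List.mem_toFinset, List.mem_filter, Finset.mem_filter, decide_eq_true_eq]
  rw [hmemc z]
  unfold compF
  simp only [Finset.mem_filter, List.mem_toFinset]
  unfold pvNode
  tauto

lemma B_iff (ls : List (List Int)) :
    (validMutationList_alt ls = true ↔ pvGood (PySem.List.enumerate ls 0)) := by
  obtain ⟨hnd, hnodes, hcover, hcomp⟩ := partOK_fold (PySem.List.enumerate ls 0)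
  set E := PySem.List.enumerate ls 0 with hE
  set comps := E.foldl altMergeStep [] with hcomps
  have hvm : validMutationList_alt ls
      = comps.all (fun c =>
          decide (c.countP (fun x => decide (x < 0)) ≥ c.countP (fun x => decide (0 ≤ x)))) := rfl
  rw [hvm, List.all_eq_true]
  constructor
  · intro hall v hv
    obtain ⟨c, hc, hvc⟩ := hcover v hv
    have hmemc := hcomp c hc v hvc
    have hndc := (hnd c hc).1
    have h1 := count_comp E c v (fun z => z < 0) hndc hmemc
    have h2 := count_comp E c v (fun z => 0 ≤ z) hndc hmemc
    have := hall c hc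
    rw [decide_eq_true_iff] at this
    unfold pvCond
    rw [← h1, ← h2]
    exact this
  · intro hgood c hc
    obtain ⟨hndc, hcne⟩ := hnd c hc
    obtain ⟨x, hx⟩ := List.exists_mem_of_ne_nil c hcne
    have hxnode : pvNode E x := hnodes c hc x hx
    have hmemc := hcomp c hc x hx
    have h1 := count_comp E c x (fun z => z < 0) hndc hmemc
    have h2 := count_comp E c x (fun z => 0 ≤ z) hndc hmemc
    rw [decide_eq_true_iff]
    have := hgood x hxnode
    unfold pvCond at this
    rw [← h1, ← h2] at this
    exact this

-- ===== VERDICT (by name: the statement is the Claim_ definition above) =====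
theorem validMutationList_spec : Claim_equal_validMutationList := by
  intro ls _hdom hpre
  unfold Spec_validMutationList
  have hA := A_iff ls hpre
  have hB := B_iff ls
  cases hA' : validMutationList ls <;> cases hB' : validMutationList_alt ls <;>
    simp_all
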